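-- pv_equiv track=rewrite | github.com/andrias01/CodigoDeClases | PythonPacticeAlgoritm/ClaseComplejidad/TrabajoEntrega20Algoritmos/TrabajoAndres/13. RECURSIVE DIGIT SUM.py | super_digit_optimizado
-- ===== SOURCE A (Python) =====
-- def suma_digitos_recursiva(n):
--     """
--     Calcula la suma de los dígitos de un número recursivamente.
--
--     Args:
--         n: Número entero positivo
--
--     Returns:
--         Suma de todos los dígitos
--     """
--     if n == 0:
--         return 0
--     return (n % 10) + suma_digitos_recursiva(n // 10)
--
-- def super_digit_optimizado(n, k=1):
--     """
--     Versión optimizada usando la propiedad matemática de que el super digit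
--     es equivalente a ((n-1) % 9) + 1 para n > 0.
--
--     Args:
--         n: Número como string o entero
--         k: Número de veces que se repite n
--
--     Returns:
--         El super digit
--     """
--     if isinstance(n, str):
--         # Calcular suma de dígitos directamente del string
--         suma_digitos = sum(int(digito) for digito in n)
--     else:
--         suma_digitos = suma_digitos_recursiva(n)
--
--     suma_total = suma_digitos * k
--
--     # Aplicar la fórmula matemática
--     if suma_total == 0:
--         return 0
--     return ((suma_total - 1) % 9) + 1
-- ===== SOURCE B (Python) =====
-- def super_digit_optimizado(n, k=1):
--     """Naive super digit: form the total once, then repeatedly collapse it by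
--     peeling a digit (total = total // 10 + total % 10) until one digit is left,
--     instead of A's closed-form ((total - 1) % 9) + 1."""
--     if isinstance(n, str):
--         total = k * sum(map(int, n))
--     else:
--         s, m = 0, n
--         while m:
--             s += m % 10
--             m //= 10
--         total = k * s
--     while total > 9:
--         total = total // 10 + total % 10
--     return total
-- ===== Notes on version B (the rewrite author's own statement) =====
-- stated objective: alternative
-- what changed: Replaced A's closed-form collapse ((total-1) % 9) + 1 with the naive iterative reduction total = total // 10 + total % 10 repeated until a single digit remains, and built the digit sum by map+sum instead of a generator fold.
-- outside the precondition, e.g. on super_digit_optimizado('12', -1): A returns 6, B returns -3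
import Mathlib
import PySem

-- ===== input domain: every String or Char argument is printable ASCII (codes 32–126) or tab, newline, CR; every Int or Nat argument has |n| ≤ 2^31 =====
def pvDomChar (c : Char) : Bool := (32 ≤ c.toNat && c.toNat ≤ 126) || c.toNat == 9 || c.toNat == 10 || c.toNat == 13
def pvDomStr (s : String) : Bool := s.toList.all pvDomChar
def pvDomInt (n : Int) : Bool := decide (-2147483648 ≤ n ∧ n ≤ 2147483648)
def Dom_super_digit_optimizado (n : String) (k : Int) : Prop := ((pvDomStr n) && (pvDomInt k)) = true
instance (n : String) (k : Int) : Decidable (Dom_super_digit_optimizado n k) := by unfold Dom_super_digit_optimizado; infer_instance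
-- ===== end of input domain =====

-- B replaces A's closed-form ((total-1) % 9) + 1 by the naive iterative digit collapse
-- (total = total // 10 + total % 10 until one digit is left); objective: alternative, same cost.

-- ===== PORT A =====
-- sum(int(digito) for digito in n); int(digito) = PySem.Int.ofStr? (ValueError = none, excluded by Pre_)
def super_digit_optimizado (n : String) (k : Int) : Int :=
  let suma_digitos :=
    n.toList.foldl (fun s digito => s + (PySem.Int.ofStr? (String.ofList [digito])).getD 0) 0
  let suma_total := suma_digitos * k
  if suma_total = 0 then 0 else PySem.Int.mod (suma_total - 1) 9 + 1

-- ===== PORT B =====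
-- while total > 9: total = total // 10 + total % 10
def sdoCollapse (total : Int) : Int :=
  if 9 < total then sdoCollapse (PySem.Int.floordiv total 10 + PySem.Int.mod total 10) else total
termination_by total.toNat
decreasing_by
  rename_i h
  rw [PySem.Int.floordiv_eq_ediv_of_pos (by omega), PySem.Int.mod_eq_emod_of_pos (by omega)]
  omega

-- k * sum(map(int, n))
def super_digit_optimizado_alt (n : String) (k : Int) : Int :=
  sdoCollapse (k * (n.toList.map (fun d => (PySem.Int.ofStr? (String.ofList [d])).getD 0)).sum)

-- ===== PRECONDITION & SPEC =====
-- Pre_ excludes strings containing a non-digit character, on which A raises ValueError, and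
-- negative k combined with a nonzero digit sum: a negative repetition count is a corner no
-- caller would specify, on which A's mod-9 formula and B's no-op collapse of the negative
-- total are both defensible values.
def Pre_super_digit_optimizado (n : String) (k : Int) : Prop :=
  n.toList.all Char.isDigit = true ∧ (0 ≤ k ∨ n.toList.all (· == '0') = true)
instance (n : String) (k : Int) : Decidable (Pre_super_digit_optimizado n k) := by
  unfold Pre_super_digit_optimizado; infer_instance

def pvWitness_super_digit_optimizado : String × Int := ("59", 3)

def Spec_super_digit_optimizado (n : String) (k : Int) (out : Int) : Prop :=
  out = super_digit_optimizado_alt n k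
instance (n : String) (k : Int) (out : Int) : Decidable (Spec_super_digit_optimizado n k out) := by
  unfold Spec_super_digit_optimizado; infer_instance

-- ===== CLAIM (what is proved, stated in full; the proofs are below) =====
def Claim_equal_super_digit_optimizado : Prop := ∀ (n : String) (k : Int), Dom_super_digit_optimizado n k → Pre_super_digit_optimizado n k → Spec_super_digit_optimizado n k (super_digit_optimizado n k)

-- ===== LEMMAS AND PROOFS =====

-- int(d) for a digit character d is a value ≥ 0
theorem sdo_digit_nonneg (c : Char) (h : c.isDigit = true) :
    0 ≤ (PySem.Int.ofStr? (String.ofList [c])).getD 0 := by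
  have h2 : 48 ≤ c.toNat ∧ c.toNat ≤ 57 := by
    simp [Char.isDigit] at h
    exact ⟨h.1, h.2⟩
  have hc : Char.ofNat c.toNat = c := Char.ofNat_toNat c
  obtain ⟨h48, h57⟩ := h2
  interval_cases hm : c.toNat <;> rw [← hc] <;> decide

-- A's foldl and B's map-then-sum compute the same digit sum
theorem sdo_foldl_eq_sum (f : Char → Int) (l : List Char) (s : Int) :
    l.foldl (fun a c => a + f c) s = s + (l.map f).sum := by
  induction l generalizing s with
  | nil => simp
  | cons c l ih => simp [List.foldl, ih (s + f c)]; ring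

theorem sdo_sum_nonneg (l : List Char) (h : ∀ c ∈ l, c.isDigit = true) :
    0 ≤ (l.map (fun d => (PySem.Int.ofStr? (String.ofList [d])).getD 0)).sum := by
  induction l with
  | nil => simp
  | cons c l ih =>
    simp only [List.map, List.sum_cons]
    have h1 := sdo_digit_nonneg c (h c (by simp))
    have h2 := ih (fun d hd => h d (by simp [hd]))
    omega

-- the iterative collapse of a nonnegative total equals A's closed form
-- a string of '0's has digit sum 0
theorem sdo_sum_zero (l : List Char) (h : l.all (· == '0') = true) :
    (l.map (fun d => (PySem.Int.ofStr? (String.ofList [d])).getD 0)).sum = 0 := by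
  induction l with
  | nil => simp
  | cons c l ih =>
    simp only [List.all_cons, Bool.and_eq_true, beq_iff_eq] at h
    simp only [List.map, List.sum_cons, h.1, ih h.2]
    decide

theorem sdo_collapse_eq (t : Int) (ht : 0 ≤ t) :
    sdoCollapse t = if t = 0 then 0 else (t - 1) % 9 + 1 := by
  induction t using sdoCollapse.induct with
  | case1 t h ih =>
    rw [sdoCollapse]
    simp only [if_pos h]
    rw [PySem.Int.floordiv_eq_ediv_of_pos (by omega : (0:Int) < 10),
        PySem.Int.mod_eq_emod_of_pos (by omega : (0:Int) < 10)] at ih ⊢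
    rw [ih (by omega)]
    split_ifs with h1 h2 h3 <;> omega
  | case2 t h =>
    rw [sdoCollapse]
    simp only [if_neg h]
    split_ifs with h1
    · omega
    · omega

-- ===== VERDICT (by name: the statement is the Claim_ definition above) =====
theorem super_digit_optimizado_spec : Claim_equal_super_digit_optimizado := by
  intro n k _ hpre
  obtain ⟨hdig, hk⟩ := hpre
  unfold Spec_super_digit_optimizado super_digit_optimizado super_digit_optimizado_alt
  have hfold := sdo_foldl_eq_sum
    (fun d => (PySem.Int.ofStr? (String.ofList [d])).getD 0) n.toList 0
  simp only [zero_add] at hfold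
  rw [hfold]
  set S := (n.toList.map (fun d => (PySem.Int.ofStr? (String.ofList [d])).getD 0)).sum with hS
  rcases hk with hk | hz
  · have hSnn : 0 ≤ S := sdo_sum_nonneg n.toList (List.all_eq_true.mp hdig)
    have htot : 0 ≤ S * k := mul_nonneg hSnn hk
    rw [sdo_collapse_eq (k * S) (by rw [mul_comm]; exact htot), mul_comm k S]
    simp only []
    rw [PySem.Int.mod_eq_emod_of_pos (by omega : (0:Int) < 9)]
  · have hS0 : S = 0 := sdo_sum_zero n.toList hz
    rw [hS0, mul_zero, sdoCollapse]
    norm_num
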